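-- pv_equiv track=rewrite | github.com/sathishkumar118/Coding-Interview-Problems | Arrays/sweetAndSavory.py | sweetAndSavory
-- ===== SOURCE A (Python) =====
-- def sweetAndSavory(dishes, target):
--     # Sort the dishes
--     dishes.sort()
--
--     # Separate sweet and savory dishes
--     sweet_dishes = [dish for dish in dishes if dish < 0]
--     savory_dishes = [dish for dish in dishes if dish > 0]
--
--     # Pointers for the sweet and savory lists
--     i, j = 0, len(savory_dishes) - 1
--     best_pair = [0, 0]
--     best_pair_sum = float('inf')
--
--     # Use two-pointer approach to find the best pair
--     while i < len(sweet_dishes) and j >= 0: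
--         curr_sum = sweet_dishes[i] + savory_dishes[j]
--         diff = target - curr_sum
--
--         if diff >= 0 and diff < best_pair_sum:
--             best_pair_sum = diff
--             best_pair = [sweet_dishes[i], savory_dishes[j]]
--
--         if curr_sum < target:
--             i += 1
--         else:
--             j -= 1
--
--     return best_pair
-- ===== SOURCE B (Python) =====
-- def sweetAndSavory(dishes, target):
--     dishes.sort()
--     sweet_dishes = [dish for dish in dishes if dish < 0]
--     savory_dishes = [dish for dish in dishes if dish > 0]
--     best_pair = [0, 0]
--     best_pair_sum = float('inf')
--     for sweet in sweet_dishes: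
--         for savory in savory_dishes:
--             diff = target - (sweet + savory)
--             if diff >= 0 and diff < best_pair_sum:
--                 best_pair_sum = diff
--                 best_pair = [sweet, savory]
--     return best_pair
-- ===== Notes on version B (the rewrite author's own statement) =====
-- stated objective: simpler
-- what changed: Replaces A's two-pointer scan over the sorted sweet/savory lists with a plain exhaustive nested loop over every (sweet, savory) pair, keeping the pair with the smallest non-negative difference to the target.
import Mathlib
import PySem

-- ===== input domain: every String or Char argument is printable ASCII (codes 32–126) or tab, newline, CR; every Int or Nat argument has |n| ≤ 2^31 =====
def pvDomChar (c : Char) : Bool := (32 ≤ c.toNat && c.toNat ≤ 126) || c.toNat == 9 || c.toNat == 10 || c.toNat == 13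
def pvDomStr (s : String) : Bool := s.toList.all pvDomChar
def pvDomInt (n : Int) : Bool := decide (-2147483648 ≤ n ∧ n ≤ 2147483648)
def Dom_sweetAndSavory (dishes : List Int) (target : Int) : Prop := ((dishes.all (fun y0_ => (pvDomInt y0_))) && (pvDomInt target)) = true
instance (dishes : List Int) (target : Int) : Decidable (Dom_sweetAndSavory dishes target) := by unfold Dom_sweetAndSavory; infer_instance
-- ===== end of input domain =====

-- B replaces A's two-pointer scan with a plain nested loop over every (sweet, savory) pair
-- keeping the best (smallest non-negative) difference; equivalence is about the RETURN value
-- only (both A and B sort the argument in place in Python).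

-- ===== PORT A =====

-- `best_pair_sum = float('inf')` is modelled as `none`; `pvLtInf d bs` is `d < best_pair_sum`.
def pvLtInf (d : Int) (bs : Option Int) : Bool :=
  match bs with
  | none => true
  | some b => decide (d < b)

-- the `while i < len(sweet) and j >= 0` loop of A, step for step
def pvLoopA (S V : List Int) (target : Int) (i j : Int) (best : List Int) (bs : Option Int) :
    List Int :=
  if _h : i < (S.length : Int) ∧ 0 ≤ j then
    match PySem.List.pyGet? S i, PySem.List.pyGet? V j with
    | some s, some v =>
      let currSum := s + v
      let st :=
        if 0 ≤ target - currSum ∧ pvLtInf (target - currSum) bs = true then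
          ([s, v], some (target - currSum))
        else (best, bs)
      if currSum < target then
        pvLoopA S V target (i + 1) j st.1 st.2
      else
        pvLoopA S V target i (j - 1) st.1 st.2
    | _, _ => best   -- unreachable from the entry call (indices stay in range)
  else best
termination_by ((S.length : Int) - i + j + 1).toNat
decreasing_by
  · omega
  · omega

def sweetAndSavory (dishes : List Int) (target : Int) : List Int :=
  let ds := PySem.List.sorted dishes (fun x => x) false
  let sweet := ds.filter (fun d => decide (d < 0))
  let savory := ds.filter (fun d => decide (0 < d))
  pvLoopA sweet savory target 0 ((savory.length : Int) - 1) [0, 0] none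

-- ===== PORT B =====

-- one `diff = target - (sweet + savory); if diff >= 0 and diff < best_pair_sum:` step of B
def pvUpd (target : Int) (st : List Int × Option Int) (s v : Int) : List Int × Option Int :=
  if 0 ≤ target - (s + v) ∧ pvLtInf (target - (s + v)) st.2 = true then
    ([s, v], some (target - (s + v)))
  else st

-- B's nested `for sweet in …: for savory in …:` loops
def pvGrid (target : Int) (S V : List Int) (st : List Int × Option Int) :
    List Int × Option Int :=
  S.foldl (fun st s => V.foldl (fun st v => pvUpd target st s v) st) st

def sweetAndSavory_alt (dishes : List Int) (target : Int) : List Int :=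
  let ds := PySem.List.sorted dishes (fun x => x) false
  let sweet := ds.filter (fun d => decide (d < 0))
  let savory := ds.filter (fun d => decide (0 < d))
  (pvGrid target sweet savory ([0, 0], none)).1

-- ===== PRECONDITION & SPEC =====
def Spec_sweetAndSavory (dishes : List Int) (target : Int) (out : List Int) : Prop := out = sweetAndSavory_alt dishes target
instance (dishes : List Int) (target : Int) (out : List Int) : Decidable (Spec_sweetAndSavory dishes target out) := by unfold Spec_sweetAndSavory; infer_instance

-- ===== CLAIM (what is proved, stated in full; the proofs are below) =====
def Claim_equal_sweetAndSavory : Prop := ∀ (dishes : List Int) (target : Int), Dom_sweetAndSavory dishes target → Spec_sweetAndSavory dishes target (sweetAndSavory dishes target)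

-- ===== LEMMAS AND PROOFS =====

-- a pair with negative diff never updates the state
lemma pvUpd_neg {t s v : Int} (st : List Int × Option Int) (h : t - (s + v) < 0) :
    pvUpd t st s v = st := by
  unfold pvUpd
  rw [if_neg]
  rintro ⟨h1, -⟩
  omega

-- pvLtInf is antitone in its first argument
lemma pvLtInf_mono {d' d : Int} {bs : Option Int} (hle : d' ≤ d)
    (h : pvLtInf d bs = true) : pvLtInf d' bs = true := by
  cases bs with
  | none => rfl
  | some b => simp [pvLtInf] at h ⊢; omega

-- once the stored diff is ≤ 0 the state is frozen
lemma pvUpd_frozen {t s v d : Int} (st : List Int × Option Int)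
    (h2 : st.2 = some d) (hd : d ≤ 0) : pvUpd t st s v = st := by
  unfold pvUpd
  rw [if_neg]
  rintro ⟨h1, h3⟩
  rw [h2] at h3
  simp [pvLtInf] at h3
  omega

lemma pvRow_frozen {t s d : Int} (V : List Int) :
    ∀ st : List Int × Option Int, st.2 = some d → d ≤ 0 →
      V.foldl (fun st v => pvUpd t st s v) st = st := by
  induction V with
  | nil => intro st _ _; rfl
  | cons v V ih =>
    intro st h2 hd
    rw [List.foldl_cons, pvUpd_frozen st h2 hd]
    exact ih st h2 hd

lemma pvGrid_frozen {t d : Int} (S V : List Int) (st : List Int × Option Int)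
    (h2 : st.2 = some d) (hd : d ≤ 0) : pvGrid t S V st = st := by
  induction S with
  | nil => rfl
  | cons s S ih =>
    unfold pvGrid at ih ⊢
    rw [List.foldl_cons, pvRow_frozen V st h2 hd]
    exact ih

-- a later, at-least-as-good update absorbs an earlier one in the same row
lemma pvUpd_absorb {t s v w : Int} (st : List Int × Option Int)
    (hvw : v ≤ w) (hw : 0 ≤ t - (s + w)) :
    pvUpd t (pvUpd t st s v) s w = pvUpd t st s w := by
  by_cases hin : 0 ≤ t - (s + v) ∧ pvLtInf (t - (s + v)) st.2 = true
  · have e1 : pvUpd t st s v = ([s, v], some (t - (s + v))) := by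
      unfold pvUpd; exact if_pos hin
    rw [e1]
    by_cases hlt : t - (s + w) < t - (s + v)
    · have e2 : pvUpd t ([s, v], some (t - (s + v))) s w = ([s, w], some (t - (s + w))) := by
        unfold pvUpd
        exact if_pos ⟨hw, by simp [pvLtInf]; omega⟩
      rw [e2]
      unfold pvUpd
      rw [if_pos ⟨hw, pvLtInf_mono (le_of_lt hlt) hin.2⟩]
    · have heq : v = w := by omega
      subst heq
      have e2 : pvUpd t ([s, v], some (t - (s + v))) s v = ([s, v], some (t - (s + v))) := by
        unfold pvUpd
        rw [if_neg]
        rintro ⟨-, h3⟩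
        simp [pvLtInf] at h3
      rw [e2]
      unfold pvUpd
      rw [if_pos ⟨hw, hin.2⟩]
  · rw [show pvUpd t st s v = st from by unfold pvUpd; exact if_neg hin]

-- row characterization: a fold of valid (diff ≥ 0) updates over a sorted row
-- equals the single update by the row's last (largest) element
lemma pvRow_eq (t s : Int) (vs : List Int) (hne : vs ≠ [])
    (hsort : vs.Pairwise (· ≤ ·)) (hvalid : ∀ v ∈ vs, 0 ≤ t - (s + v)) :
    ∀ st, vs.foldl (fun st v => pvUpd t st s v) st = pvUpd t st s (vs.getLast hne) := by
  induction vs with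
  | nil => exact absurd rfl hne
  | cons v vs ih =>
    intro st
    cases vs with
    | nil => simp [List.foldl]
    | cons v' vs' =>
      have hne' : v' :: vs' ≠ [] := by simp
      have hlast : (v :: v' :: vs').getLast hne = (v' :: vs').getLast hne' := by
        simp [List.getLast]
      have hmem : (v' :: vs').getLast hne' ∈ v' :: vs' := List.getLast_mem hne'
      have hvw : v ≤ (v' :: vs').getLast hne' := by
        rcases List.pairwise_cons.1 hsort with ⟨hall, _⟩
        exact hall _ hmem
      have hw : 0 ≤ t - (s + (v' :: vs').getLast hne') :=
        hvalid _ (List.mem_cons_of_mem _ hmem)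
      calc ((v :: v' :: vs').foldl (fun st v => pvUpd t st s v) st)
          = (v' :: vs').foldl (fun st v => pvUpd t st s v) (pvUpd t st s v) := by
            simp [List.foldl]
        _ = pvUpd t (pvUpd t st s v) s ((v' :: vs').getLast hne') := by
            refine ih hne' ?_ ?_ _
            · exact (List.pairwise_cons.1 hsort).2
            · intro x hx; exact hvalid x (List.mem_cons_of_mem _ hx)
        _ = pvUpd t st s ((v' :: vs').getLast hne') := pvUpd_absorb st hvw hw
        _ = pvUpd t st s ((v :: v' :: vs').getLast hne) := by rw [hlast]

-- dropping a final column whose pairs all have negative diff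
lemma pvGrid_drop_col {t w : Int} (S V : List Int) (st : List Int × Option Int)
    (hneg : ∀ s ∈ S, t - (s + w) < 0) :
    pvGrid t S (V ++ [w]) st = pvGrid t S V st := by
  induction S generalizing st with
  | nil => rfl
  | cons s S ih =>
    have hrow : (V ++ [w]).foldl (fun st v => pvUpd t st s v) st
        = V.foldl (fun st v => pvUpd t st s v) st := by
      rw [List.foldl_append]
      simp [List.foldl, pvUpd_neg _ (hneg s (by simp))]
    simp only [pvGrid, List.foldl_cons] at *
    rw [hrow]
    exact ih _ (fun x hx => hneg x (by simp [hx]))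

-- the state invariant: the stored diff, if any, is non-negative
def pvInv (bs : Option Int) : Prop := bs = none ∨ ∃ d, bs = some d ∧ 0 ≤ d

lemma pvUpd_inv {t s v : Int} (st : List Int × Option Int) (h : pvInv st.2) :
    pvInv (pvUpd t st s v).2 := by
  unfold pvUpd
  split_ifs with hc
  · exact Or.inr ⟨_, rfl, hc.1⟩
  · exact h

lemma pvGrid_nil_cols (t : Int) (S : List Int) (st : List Int × Option Int) :
    pvGrid t S [] st = st := by
  induction S with
  | nil => rfl
  | cons s S ih =>
    unfold pvGrid at ih ⊢
    rw [List.foldl_cons]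
    exact ih

lemma pvSorted_getElem_le {V : List Int} (hV : V.Pairwise (· ≤ ·)) {p q : Nat}
    (hpq : p ≤ q) (hq : q < V.length) : V[p] ≤ V[q] := by
  rcases Nat.lt_or_ge p q with hlt | hge
  · exact (List.pairwise_iff_getElem.1 hV) p q (by omega) hq hlt
  · have : p = q := by omega
    subst this; exact le_refl _

lemma pvTake_getLast {V : List Int} {k : Nat} (hk : k < V.length)
    (hne : V.take (k + 1) ≠ []) : (V.take (k + 1)).getLast hne = V[k] := by
  have hlen : (V.take (k + 1)).length = k + 1 := by
    simp [List.length_take]; omega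
  rw [List.getLast_eq_getElem]
  simp only [hlen]
  simp [List.getElem_take]

-- main loop ↔ grid correspondence
lemma pvLoop_eq (t : Int) (S V : List Int)
    (hS : S.Pairwise (· ≤ ·)) (hV : V.Pairwise (· ≤ ·)) :
    ∀ (n : Nat) (i j : Int) (best : List Int) (bs : Option Int),
      ((S.length : Int) - i + j + 1).toNat ≤ n →
      0 ≤ i → j < (V.length : Int) → pvInv bs →
      pvLoopA S V t i j best bs
        = (pvGrid t (S.drop i.toNat) (V.take (j + 1).toNat) (best, bs)).1 := by
  intro n
  induction n with
  | zero =>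
    intro i j best bs hn hi hj hbs
    rw [pvLoopA]
    rw [dif_neg (by omega)]
    -- guard is false: i ≥ |S| (j ≥ 0 would make the measure positive) … in fact both cases
    have : ¬ (i < (S.length : Int) ∧ 0 ≤ j) := by omega
    rcases Classical.em (i < (S.length : Int)) with hilt | hige
    · have hjneg : j < 0 := by omega
      have : (j + 1).toNat = 0 := by omega
      rw [this]
      simp [pvGrid_nil_cols]
    · have : S.length ≤ i.toNat := by omega
      rw [List.drop_eq_nil_of_le this]
      rfl
  | succ n ih =>
    intro i j best bs hn hi hj hbs
    rw [pvLoopA]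
    by_cases hg : i < (S.length : Int) ∧ 0 ≤ j
    · rw [dif_pos hg]
      have hiN : i.toNat < S.length := by omega
      have hjN : j.toNat < V.length := by omega
      have hgS : PySem.List.pyGet? S i = some S[i.toNat] :=
        PySem.List.pyGet?_eq_some_getElem S hi (by omega)
      have hgV : PySem.List.pyGet? V j = some V[j.toNat] :=
        PySem.List.pyGet?_eq_some_getElem V hg.2 (by omega)
      rw [hgS, hgV]
      simp only
      set s := S[i.toNat] with hs
      set v := V[j.toNat] with hv
      have hstEq :
          (if 0 ≤ t - (s + v) ∧ pvLtInf (t - (s + v)) bs = true then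
              ([s, v], some (t - (s + v)))
            else (best, bs)) = pvUpd t (best, bs) s v := rfl
      rw [hstEq]
      have hinv' : pvInv (pvUpd t (best, bs) s v).2 := pvUpd_inv _ hbs
      have hne : V.take (j + 1).toNat ≠ [] := by
        have : (V.take (j + 1).toNat).length = (j + 1).toNat := by
          simp [List.length_take]; omega
        intro hc
        rw [hc] at this
        simp at this
        omega
      have htsort : (V.take (j + 1).toNat).Pairwise (· ≤ ·) :=
        List.Pairwise.sublist (List.take_sublist _ _) hV
      have hj1 : (j + 1).toNat = j.toNat + 1 := by omega
      have hlast : (V.take (j + 1).toNat).getLast hne = v := by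
        simp only [hj1]
        exact pvTake_getLast hjN _
      have hmem_le : ∀ v' ∈ V.take (j + 1).toNat, v' ≤ v := by
        intro v' hv'
        rw [List.mem_iff_getElem] at hv'
        obtain ⟨p, hp, hpe⟩ := hv'
        have hplen : p < (j+1).toNat := by
          have : (V.take (j + 1).toNat).length ≤ (j+1).toNat := by
            simp [List.length_take]
          omega
        have : (V.take (j + 1).toNat)[p] = V[p]'(by omega) := List.getElem_take
        rw [this] at hpe
        rw [← hpe, hv]
        exact pvSorted_getElem_le hV (by omega) hjN
      have hdrop : S.drop i.toNat = s :: S.drop (i.toNat + 1) :=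
        List.drop_eq_getElem_cons hiN
      by_cases hlt : s + v < t
      · rw [if_pos hlt]
        have hrec := ih (i + 1) j (pvUpd t (best, bs) s v).1 (pvUpd t (best, bs) s v).2
          (by omega) (by omega) hj hinv'
        rw [hrec]
        have hi1 : (i + 1).toNat = i.toNat + 1 := by omega
        rw [hi1]
        have hvalid : ∀ v' ∈ V.take (j + 1).toNat, 0 ≤ t - (s + v') := by
          intro v' hv'
          have := hmem_le v' hv'
          omega
        have hrow := pvRow_eq t s (V.take (j + 1).toNat) hne htsort hvalid (best, bs)
        rw [hlast] at hrow
        unfold pvGrid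
        rw [hdrop, List.foldl_cons, hrow]
      · rw [if_neg hlt]
        have hrec := ih i (j - 1) (pvUpd t (best, bs) s v).1 (pvUpd t (best, bs) s v).2
          (by omega) hi (by omega) hinv'
        rw [hrec]
        have hj0 : (j - 1 + 1).toNat = j.toNat := by omega
        rw [hj0]
        have htake : V.take (j + 1).toNat = V.take j.toNat ++ [v] := by
          rw [hj1, List.take_add_one]
          simp [List.getElem?_eq_getElem hjN, hv]
        by_cases hd0 : t - (s + v) < 0
        · -- strictly over target: the whole last column is a no-op and so is the update
          rw [pvUpd_neg _ hd0]
          rw [htake]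
          apply congrArg
          symm
          apply pvGrid_drop_col
          intro s' hs'
          rw [List.mem_iff_getElem] at hs'
          obtain ⟨p, hp, hpe⟩ := hs'
          have hplen : p + i.toNat < S.length := by
            have := List.length_drop (l := S) (i := i.toNat)
            omega
          have hget : (S.drop i.toNat)[p] = S[i.toNat + p]'(by omega) := by
            simp [List.getElem_drop]
          rw [hget] at hpe
          have hss : s ≤ s' := by
            rw [← hpe, hs]
            exact pvSorted_getElem_le hS (by omega) (by omega)
          omega
        · -- exactly on target: the state freezes at diff 0
          have hdz : t - (s + v) = 0 := by omega
          have hfroze : (pvUpd t (best, bs) s v).2 = some 0 := by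
            unfold pvUpd
            split_ifs with hc
            · simp [hdz]
            · -- the update failed although diff = 0, so bs itself must be some 0
              rcases hbs with hnone | ⟨d, hd, hdpos⟩
              · exact absurd ⟨by omega, by simp [hnone, pvLtInf]⟩ hc
              · have hd0' : d = 0 := by
                  have h' : ¬ pvLtInf (t - (s + v)) bs = true := fun h => hc ⟨by omega, h⟩
                  rw [hd] at h'
                  simp [pvLtInf] at h'
                  omega
                simp [hd, hd0']
          -- both grids freeze at the state pvUpd t (best, bs) s v
          rw [pvGrid_frozen _ _ _ hfroze (le_refl 0)]
          have hvalid : ∀ v' ∈ V.take (j + 1).toNat, 0 ≤ t - (s + v') := by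
            intro v' hv'
            have := hmem_le v' hv'
            omega
          have hrow := pvRow_eq t s (V.take (j + 1).toNat) hne htsort hvalid (best, bs)
          rw [hlast] at hrow
          unfold pvGrid
          rw [hdrop, List.foldl_cons, hrow]
          have hrest := pvGrid_frozen (t := t) (S.drop (i.toNat + 1)) (V.take (j + 1).toNat)
            (pvUpd t (best, bs) s v) hfroze (le_refl 0)
          unfold pvGrid at hrest
          rw [hrest]
    · rw [dif_neg hg]
      rcases Classical.em (i < (S.length : Int)) with hilt | hige
      · have hjneg : j < 0 := by omega
        have : (j + 1).toNat = 0 := by omega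
        rw [this]
        simp [pvGrid_nil_cols]
      · have : S.length ≤ i.toNat := by omega
        rw [List.drop_eq_nil_of_le this]
        rfl

-- ===== VERDICT (by name: the statement is the Claim_ definition above) =====
theorem sweetAndSavory_spec : Claim_equal_sweetAndSavory := by
  unfold Claim_equal_sweetAndSavory Spec_sweetAndSavory
  intro dishes target _
  unfold sweetAndSavory sweetAndSavory_alt
  simp only
  set ds := PySem.List.sorted dishes (fun x => x) false with hds
  set sweet := ds.filter (fun d => decide (d < 0)) with hsw
  set savory := ds.filter (fun d => decide (0 < d)) with hsv
  have hdsort : ds.Pairwise (· ≤ ·) := PySem.List.sorted_pairwise dishes (fun x => x)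
  have hS : sweet.Pairwise (· ≤ ·) :=
    List.Pairwise.sublist List.filter_sublist hdsort
  have hV : savory.Pairwise (· ≤ ·) :=
    List.Pairwise.sublist List.filter_sublist hdsort
  have hmain := pvLoop_eq target sweet savory hS hV
    (((sweet.length : Int) - 0 + ((savory.length : Int) - 1) + 1).toNat)
    0 ((savory.length : Int) - 1) [0, 0] none (le_refl _) (le_refl 0) (by omega)
    (Or.inl rfl)
  rw [hmain]
  have h1 : (0 : Int).toNat = 0 := rfl
  have h2 : ((savory.length : Int) - 1 + 1).toNat = savory.length := by omega
  rw [h1, h2, List.drop_zero, List.take_length]
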